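-- pv_equiv track=rewrite | github.com/VictorZuanazzi/ccxt | unbalance 7.py | define_coins_of_interest
-- ===== SOURCE A (Python) =====
-- def define_coins_of_interest(exchange, trair, interesting_coins = ['BTC', 'EUR', 'ETH']):
--     '''
--
--         Return a list the same size as trairs with the corresponding coins of
--         interest.
--     '''
--     #it is necessary to know the currencies of interest.
--     coin_of_interest = []
--
--     #looks for the most interesting coin of each trair and build a list to store
--     #tehm.
--     for p in range(len(trair)):
--         coin_of_interest.append('')
--         i = 0
--         #iterats over the all the interesting_coins until there one in the trair
--         #that is of interest.
--         while (coin_of_interest[p] == '') and (i < len(interesting_coins)):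
--             for j in trair[p]:
--                 if interesting_coins[i] in j:
--                     coin_of_interest[p] = interesting_coins[i]
--             i = i+1
--
--     return coin_of_interest
-- ===== SOURCE B (Python) =====
-- def define_coins_of_interest(exchange, trair, interesting_coins=['BTC', 'EUR', 'ETH']):
--     """Per pair: strings outer, coins inner.  For each string find the best
--     (lowest-priority-index) coin it contains, scanning only indices below the
--     best found so far; the pair's coin is the one at the minimal index ('' if none)."""
--     result = []
--     n = len(interesting_coins)
--     for pair in trair:
--         best = n  # sentinel: nothing found yet
--         for s in pair:
--             for k in range(best):
--                 if interesting_coins[k] in s: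
--                     best = k
--                     break
--         result.append(interesting_coins[best] if best < n else '')
--     return result
-- ===== Notes on version B (the rewrite author's own statement) =====
-- stated objective: alternative
-- what changed: Replaces A's priority-first scan (while over coins, rescanning all of the pair's strings per coin, no inner break) by an inverted-nesting min-index pass per pair: strings outer, coins inner with a break at the first hit and a search bound that shrinks to the best priority index found so far; the pair's coin is the one at the minimal index ('' if none).
-- outside the precondition, e.g. on define_coins_of_interest('e', [['BTC/EUR']], ['', 'BTC']): A returns ['BTC'], B returns ['']
import Mathlib
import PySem

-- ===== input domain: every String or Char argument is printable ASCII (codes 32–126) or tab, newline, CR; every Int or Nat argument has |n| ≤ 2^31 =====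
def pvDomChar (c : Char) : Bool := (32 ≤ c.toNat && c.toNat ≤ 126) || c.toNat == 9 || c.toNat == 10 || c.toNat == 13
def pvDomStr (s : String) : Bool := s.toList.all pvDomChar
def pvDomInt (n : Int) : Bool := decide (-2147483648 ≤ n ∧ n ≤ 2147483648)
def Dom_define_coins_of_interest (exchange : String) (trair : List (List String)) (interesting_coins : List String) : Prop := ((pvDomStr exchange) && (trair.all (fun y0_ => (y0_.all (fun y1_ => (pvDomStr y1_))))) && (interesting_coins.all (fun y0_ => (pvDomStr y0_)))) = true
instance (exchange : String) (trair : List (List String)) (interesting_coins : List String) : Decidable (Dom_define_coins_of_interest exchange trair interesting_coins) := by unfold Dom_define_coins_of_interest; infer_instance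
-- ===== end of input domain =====

-- B replaces A's priority-first scan (while over coins, rescanning every string of the
-- pair for each coin, no break in the inner loop) by an inverted-nesting min-index pass:
-- strings outer, coins inner with a break at the first hit and a search bound that
-- shrinks to the best priority index found so far; the pair's coin is the one at the
-- minimal index ('' if none).  Objective: alternative decomposition.

-- ===== PORT A =====
-- 'for j in trair[p]: if interesting_coins[i] in j: coin_of_interest[p] = interesting_coins[i]'
def aInner (pair : List String) (c : String) (cur : String) : String :=
  pair.foldl (fun acc j => if PySem.Str.isIn c j then c else acc) cur

-- 'while (coin_of_interest[p] == '') and (i < len(interesting_coins)): … ; i = i+1'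
def aWhile (pair : List String) (coins : List String) (cur : String) : String :=
  match coins with
  | [] => cur
  | c :: rest => if cur == "" then aWhile pair rest (aInner pair c cur) else cur

def define_coins_of_interest (exchange : String) (trair : List (List String)) (interesting_coins : List String) : List String :=
  trair.foldl (fun acc pair => acc ++ [aWhile pair interesting_coins ""]) []

-- ===== PORT B =====
-- 'for k in range(best): if interesting_coins[k] in s: best = k; break'
-- (coins.getD k "" is exact for interesting_coins[k]: k < best ≤ len(interesting_coins))
def bScan (coins : List String) (s : String) (best : Nat) (k : Nat) : Nat :=
  if k < best then
    if PySem.Str.isIn (coins.getD k "") s then k else bScan coins s best (k + 1)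
  else best
termination_by best - k

-- 'best = n; for s in pair: …'
def bBest (coins : List String) (pair : List String) : Nat :=
  pair.foldl (fun best s => bScan coins s best 0) coins.length

def define_coins_of_interest_alt (exchange : String) (trair : List (List String)) (interesting_coins : List String) : List String :=
  trair.map (fun pair =>
    let best := bBest interesting_coins pair
    if best < interesting_coins.length then interesting_coins.getD best "" else "")

-- ===== PRECONDITION & SPEC =====
-- Pre_ excludes an empty-string entry in interesting_coins: there A's while-test treats
-- the matched '' as 'nothing found yet' and keeps scanning lower-priority coins — an
-- accidental corner where both behaviours are equally (un)defensible.
def Pre_define_coins_of_interest (exchange : String) (trair : List (List String)) (interesting_coins : List String) : Prop :=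
  "" ∉ interesting_coins
instance (exchange : String) (trair : List (List String)) (interesting_coins : List String) : Decidable (Pre_define_coins_of_interest exchange trair interesting_coins) := by unfold Pre_define_coins_of_interest; infer_instance

def pvWitness_define_coins_of_interest : String × List (List String) × List String :=
  ("binance", [["BTC/USDT", "x"], ["ETH/EUR"]], ["BTC", "EUR", "ETH"])

def Spec_define_coins_of_interest (exchange : String) (trair : List (List String)) (interesting_coins : List String) (out : List String) : Prop := out = define_coins_of_interest_alt exchange trair interesting_coins
instance (exchange : String) (trair : List (List String)) (interesting_coins : List String) (out : List String) : Decidable (Spec_define_coins_of_interest exchange trair interesting_coins out) := by unfold Spec_define_coins_of_interest; infer_instance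

-- ===== CLAIM (what is proved, stated in full; the proofs are below) =====
def Claim_equal_define_coins_of_interest : Prop := ∀ (exchange : String) (trair : List (List String)) (interesting_coins : List String), Dom_define_coins_of_interest exchange trair interesting_coins → Pre_define_coins_of_interest exchange trair interesting_coins → Spec_define_coins_of_interest exchange trair interesting_coins (define_coins_of_interest exchange trair interesting_coins)

-- ===== LEMMAS AND PROOFS =====

-- reference value of A's per-pair computation: first coin present somewhere in the pair
def firstHit (pair : List String) : List String → String
  | [] => ""
  | c :: rest => if pair.any (fun j => PySem.Str.isIn c j) then c else firstHit pair rest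

theorem aInner_eq (pair : List String) (c : String) (cur : String) :
    aInner pair c cur = if pair.any (fun j => PySem.Str.isIn c j) then c else cur := by
  induction pair generalizing cur with
  | nil => simp [aInner]
  | cons j rest ih =>
    simp only [aInner, List.foldl_cons, List.any_cons] at *
    rw [ih]
    rcases Bool.eq_false_or_eq_true (PySem.Str.isIn c j) with h1 | h1 <;>
      rcases Bool.eq_false_or_eq_true (rest.any fun j => PySem.Str.isIn c j) with h2 | h2 <;>
        simp only [h1, h2, Bool.or_false, Bool.or_true] <;>
          simp

theorem aWhile_ne_empty (pair : List String) (coins : List String) (cur : String)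
    (h : cur ≠ "") : aWhile pair coins cur = cur := by
  cases coins <;> simp [aWhile, h]

theorem aWhile_eq_firstHit (pair : List String) (coins : List String)
    (h : "" ∉ coins) : aWhile pair coins "" = firstHit pair coins := by
  induction coins with
  | nil => simp [aWhile, firstHit]
  | cons c rest ih =>
    have hc : c ≠ "" := by rintro rfl; exact h (List.mem_cons_self ..)
    have hrest : "" ∉ rest := fun hm => h (List.mem_cons_of_mem _ hm)
    simp only [aWhile, firstHit, if_pos (by rfl : ("" == "") = true), aInner_eq]
    split_ifs with hhit
    · exact aWhile_ne_empty pair rest c hc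
    · exact ih hrest

-- index of the first coin contained in s ( = coins.length if none)
def idxOf (coins : List String) (s : String) : Nat :=
  coins.findIdx (fun c => PySem.Str.isIn c s)

theorem bScan_eq (coins : List String) (s : String) (best k : Nat)
    (hb : best ≤ coins.length) :
    bScan coins s best k = min best (k + ((coins.drop k).findIdx (fun c => PySem.Str.isIn c s))) := by
  by_cases hk : k < best
  · have hkl : k < coins.length := lt_of_lt_of_le hk hb
    have hdrop : coins.drop k = coins[k] :: coins.drop (k + 1) :=
      List.drop_eq_getElem_cons hkl
    have hget : coins.getD k "" = coins[k] := List.getD_eq_getElem coins "" hkl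
    rw [bScan, if_pos hk, hget, hdrop]
    rcases Bool.eq_false_or_eq_true (PySem.Str.isIn coins[k] s) with hp | hp
    · rw [if_pos hp]
      simp only [List.findIdx_cons, hp, cond_true]
      omega
    · rw [if_neg (fun hc => by rw [hp] at hc; exact absurd hc (by decide)), bScan_eq coins s best (k + 1) hb]
      simp only [List.findIdx_cons, hp, cond_false]
      omega
  · rw [bScan, if_neg hk]
    omega
termination_by best - k

theorem bBest_eq (coins : List String) (pair : List String) :
    ∀ b, b ≤ coins.length →
      pair.foldl (fun best s => bScan coins s best 0) b
        = (pair.map (idxOf coins)).foldl min b := by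
  induction pair with
  | nil => intro b _; rfl
  | cons s rest ih =>
    intro b hb
    simp only [List.foldl_cons, List.map_cons]
    rw [bScan_eq coins s b 0 hb]
    simp only [Nat.zero_add, List.drop_zero]
    exact ih _ (le_trans (Nat.min_le_left _ _) hb)

theorem foldl_min_le (l : List Nat) : ∀ b, l.foldl min b ≤ b := by
  induction l with
  | nil => intro b; exact le_refl b
  | cons x rest ih => intro b; exact le_trans (ih _) (Nat.min_le_left ..)

theorem foldl_min_zero (l : List Nat) : ∀ b, 0 ∈ l → l.foldl min b = 0 := by
  induction l with
  | nil => intro b h; simp at h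
  | cons x rest ih =>
    intro b h
    rcases List.mem_cons.mp h with rfl | hx
    · simp only [List.foldl_cons, Nat.min_zero]
      exact Nat.le_zero.mp (foldl_min_le rest 0)
    · simp only [List.foldl_cons]
      exact ih _ hx

theorem foldl_min_succ (l : List Nat) : ∀ b,
    (l.map (· + 1)).foldl min (b + 1) = l.foldl min b + 1 := by
  induction l with
  | nil => intro b; rfl
  | cons x rest ih =>
    intro b
    simp only [List.map_cons, List.foldl_cons]
    rw [show min (b + 1) (x + 1) = min b x + 1 by omega]
    exact ih (min b x)

theorem firstHit_eq_min (pair : List String) (coins : List String) :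
    firstHit pair coins =
      (let m := (pair.map (idxOf coins)).foldl min coins.length
       if m < coins.length then coins.getD m "" else "") := by
  induction coins with
  | nil => simp [firstHit]
  | cons c rest ih =>
    simp only [firstHit]
    have hidx : ∀ s, idxOf (c :: rest) s =
        if PySem.Str.isIn c s = true then 0 else idxOf rest s + 1 := by
      intro s
      rcases Bool.eq_false_or_eq_true (PySem.Str.isIn c s) with h | h <;>
        simp only [idxOf, List.findIdx_cons, h, cond_true, cond_false] <;> simp
    by_cases hhit : pair.any (fun j => PySem.Str.isIn c j) = true
    · rw [if_pos hhit]
      obtain ⟨s, hs, hp⟩ := List.any_eq_true.mp hhit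
      have h0 : (0 : Nat) ∈ pair.map (idxOf (c :: rest)) := by
        refine List.mem_map.mpr ⟨s, hs, ?_⟩
        rw [hidx s, if_pos hp]
      rw [foldl_min_zero _ _ h0]
      simp
    · rw [if_neg hhit]
      have hnone : ∀ s ∈ pair, PySem.Str.isIn c s = false := by
        intro s hs
        cases hcase : PySem.Str.isIn c s
        · rfl
        · exact absurd (List.any_eq_true.mpr ⟨s, hs, hcase⟩) hhit
      have hmap : pair.map (idxOf (c :: rest)) = (pair.map (idxOf rest)).map (· + 1) := by
        rw [List.map_map]
        apply List.map_congr_left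
        intro s hs
        simp only [Function.comp_apply]
        rw [hidx s, if_neg (fun hc => by rw [hnone s hs] at hc; exact absurd hc (by decide))]
      rw [hmap, ih]
      simp only [List.length_cons, foldl_min_succ, Nat.add_lt_add_iff_right]
      by_cases hm : (pair.map (idxOf rest)).foldl min rest.length < rest.length
      · rw [if_pos hm, if_pos hm]
        exact (List.getD_cons_succ ..).symm
      · rw [if_neg hm, if_neg hm]

-- ===== VERDICT (by name: the statement is the Claim_ definition above) =====
theorem define_coins_of_interest_spec : Claim_equal_define_coins_of_interest := by
  intro exchange trair coins _ hpre
  unfold Spec_define_coins_of_interest define_coins_of_interest define_coins_of_interest_alt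
  rw [PySem.List.foldl_append_singleton_eq_map]
  apply List.map_congr_left
  intro pair _
  rw [aWhile_eq_firstHit pair coins hpre, firstHit_eq_min pair coins]
  unfold bBest
  rw [bBest_eq coins pair coins.length (le_refl _)]
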